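-- pv_equiv track=rewrite | github.com/xyang-zh/net | net.py | mask_to_cpus
-- ===== SOURCE A (Python) =====
-- from typing import List, Optional, Dict, Tuple
--
-- def mask_to_cpus(mask: str) -> List[int]:
--     cpus = []
--     segs = mask.split(',')
--     for grp_idx, seg in enumerate(reversed(segs)):
--         seg_val = int(seg, 16)
--         for bit in range(32):
--             if seg_val & (1 << bit):
--                 cpus.append(grp_idx * 32 + bit)
--
--     return sorted(cpus)
-- ===== SOURCE B (Python) =====
-- from typing import List
--
-- def mask_to_cpus(mask: str) -> List[int]:
--     total = 0
--     for idx, seg in enumerate(reversed(mask.split(','))):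
--         total |= (int(seg, 16) & 0xFFFFFFFF) << (idx * 32)
--     return [i for i in range(total.bit_length()) if (total >> i) & 1]
-- ===== Notes on version B (the rewrite author's own statement) =====
-- stated objective: alternative
-- what changed: Instead of appending per-bit cpu ids segment by segment and sorting at the end, B ORs all segments (masked to 32 bits) into one big integer and then emits its set-bit indices in one ascending pass, so no sort and no per-segment list appends are needed.
import Mathlib
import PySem

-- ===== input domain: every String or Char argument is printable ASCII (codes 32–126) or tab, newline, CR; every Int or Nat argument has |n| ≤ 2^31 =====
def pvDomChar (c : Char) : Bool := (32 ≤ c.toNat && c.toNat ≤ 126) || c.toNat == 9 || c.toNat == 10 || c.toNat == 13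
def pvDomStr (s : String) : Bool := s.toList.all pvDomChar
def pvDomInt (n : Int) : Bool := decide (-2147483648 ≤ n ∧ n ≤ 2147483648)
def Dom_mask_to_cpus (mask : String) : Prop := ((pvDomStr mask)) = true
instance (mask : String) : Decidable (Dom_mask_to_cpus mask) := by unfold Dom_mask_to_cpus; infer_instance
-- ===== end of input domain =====

-- B ORs all segments (masked to 32 bits) into one integer and lists its set bits in one
-- ascending pass (no sort), instead of A's per-segment bit loop with a final sort.

-- ===== PORT A =====
-- mask.split(','): the separator "," is never empty, so split? never returns none (getD [] unreachable)
def mask_to_cpus (mask : String) : List Int :=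
  let segs := (PySem.Str.split? mask ",").getD []
  let cpus := (PySem.List.enumerate segs.reverse).foldl
    (fun cpus p =>
      match PySem.Int.ofStrBase? p.2 16 with
      | none => cpus          -- int(seg, 16) raises ValueError; excluded by Pre_
      | some segVal =>
        (PySem.List.pyRange 0 32 1).foldl
          (fun cpus bit =>
            if PySem.Int.band segVal ((1 : Int) <<< bit) ≠ 0 then
              cpus ++ [p.1 * 32 + bit]
            else cpus) cpus) []
  PySem.List.sorted cpus (fun x => x)

-- ===== PORT B =====
def mask_to_cpus_alt (mask : String) : List Int :=
  let total := (PySem.List.enumerate ((PySem.Str.split? mask ",").getD []).reverse).foldl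
    (fun total p =>
      match PySem.Int.ofStrBase? p.2 16 with
      | none => total         -- int(seg, 16) raises ValueError; excluded by Pre_
      | some v => PySem.Int.bor total (PySem.Int.band v 0xFFFFFFFF <<< (p.1 * 32))) 0
  (PySem.List.pyRange 0 (PySem.Int.bitLength total : Int) 1).filter
    (fun i => PySem.Int.band (total >>> i) 1 ≠ 0)

-- ===== PRECONDITION & SPEC =====
-- Pre_: every comma-separated segment is a valid base-16 int literal (otherwise A raises ValueError)
def Pre_mask_to_cpus (mask : String) : Prop :=
  ∀ seg ∈ (PySem.Str.split? mask ",").getD [], (PySem.Int.ofStrBase? seg 16).isSome = true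
instance (mask : String) : Decidable (Pre_mask_to_cpus mask) := by unfold Pre_mask_to_cpus; infer_instance
def pvWitness_mask_to_cpus : String := "ff,3"

def Spec_mask_to_cpus (mask : String) (out : List Int) : Prop := out = mask_to_cpus_alt mask
instance (mask : String) (out : List Int) : Decidable (Spec_mask_to_cpus mask out) := by unfold Spec_mask_to_cpus; infer_instance

-- ===== CLAIM (what is proved, stated in full; the proofs are below) =====
def Claim_equal_mask_to_cpus : Prop := ∀ (mask : String), Dom_mask_to_cpus mask → Pre_mask_to_cpus mask → Spec_mask_to_cpus mask (mask_to_cpus mask)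

-- ===== LEMMAS AND PROOFS =====

-- value of a parsed segment (only used where Pre_ guarantees parsing succeeds)
def pvVal (s : String) : Int := (PySem.Int.ofStrBase? s 16).getD 0

-- the low 32 bits of a segment value, as a Nat (Python's  v & 0xFFFFFFFF)
def pvW (v : Int) : Nat := (PySem.Int.band v 0xFFFFFFFF).toNat

-- cpu ids contributed by segment value v at group index g, in ascending order
def pvBits (g v : Int) : List Int :=
  ((PySem.List.pyRange 0 32 1).filter
    (fun b => PySem.Int.band v ((1 : Int) <<< b) ≠ 0)).map (fun b => g * 32 + b)

-- the whole cpu list, segment blocks in ascending group order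
def pvAList : Int → List String → List Int
  | _, [] => []
  | g, s :: t => pvBits g (pvVal s) ++ pvAList (g + 1) t

-- B's big integer, as a Nat
def pvT : Nat → List String → Nat
  | _, [] => 0
  | i, s :: t => (pvW (pvVal s) <<< (32 * i)) ||| pvT (i + 1) t

theorem pv_and_add_ldiff (m : Nat) : ∀ n, (m &&& n) + Nat.ldiff m n = m := by
  induction m using Nat.binaryRec with
  | zero => intro n; simp [Nat.ldiff]
  | bit b m ih =>
    intro n
    rw [← Nat.bit_bodd_div2 n, Nat.land_bit, Nat.ldiff_bit, Nat.bit_val, Nat.bit_val, Nat.bit_val]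
    have h := ih (Nat.div2 n)
    cases b <;> cases Nat.bodd n <;>
      simp only [Bool.and_false, Bool.and_true, Bool.not_false, Bool.not_true, Bool.toNat_false,
        Bool.toNat_true] <;> omega

theorem pv_sub_and_eq_ldiff (m n : Nat) : m - (m &&& n) = Nat.ldiff m n := by
  have := pv_and_add_ldiff m n; omega

theorem pv_bandM_eq (v : Int) : PySem.Int.band v 0xFFFFFFFF = ((pvW v : Nat) : Int) := by
  have h : 0 ≤ PySem.Int.band v 0xFFFFFFFF := by
    rw [PySem.Int.band_comm]
    exact PySem.Int.band_nonneg_of_nonneg_left v (by norm_num)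
  rw [pvW, Int.toNat_of_nonneg h]

theorem pv_W_eq (v : Int) : pvW v =
    if 0 ≤ v then v.toNat &&& (2 ^ 32 - 1) else Nat.ldiff (2 ^ 32 - 1) ((-v - 1).toNat) := by
  have hM : ((0xFFFFFFFF : Int)).toNat = 2 ^ 32 - 1 := rfl
  unfold pvW PySem.Int.band
  split_ifs with hv hm hm
  · rw [Int.toNat_natCast, hM]
  · exact absurd (by norm_num : (0:Int) ≤ 0xFFFFFFFF) hm
  · rw [Int.toNat_natCast, hM, pv_sub_and_eq_ldiff]
  · exact absurd (by norm_num : (0:Int) ≤ 0xFFFFFFFF) hm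

theorem pv_W_lt (v : Int) : pvW v < 2 ^ 32 := by
  rw [pv_W_eq]
  split_ifs
  · have : v.toNat &&& (2 ^ 32 - 1) ≤ 2 ^ 32 - 1 := Nat.and_le_right
    omega
  · have h2 := pv_and_add_ldiff (2 ^ 32 - 1) ((-v - 1).toNat)
    omega

theorem pv_testBit_W (v : Int) (b : Nat) (hb : b < 32) :
    (pvW v).testBit b = if 0 ≤ v then v.toNat.testBit b else !((-v - 1).toNat.testBit b) := by
  rw [pv_W_eq]
  split_ifs with h
  · rw [Nat.testBit_and, Nat.testBit_two_pow_sub_one]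
    simp [hb]
  · rw [Nat.testBit_ldiff, Nat.testBit_two_pow_sub_one]
    simp [hb]

theorem pv_band_pow (v : Int) (b : Nat) (hb : b < 32) :
    (PySem.Int.band v ((1 : Int) <<< ((b : Nat) : Int)) ≠ 0) ↔ (pvW v).testBit b = true := by
  rw [Int.one_shiftLeft, pv_testBit_W v b hb]
  unfold PySem.Int.band
  have hp : (0 : Int) ≤ ((2 ^ b : Nat) : Int) := by positivity
  split_ifs with hv
  · rw [Int.toNat_natCast, Nat.and_two_pow]
    rcases v.toNat.testBit b
    · simp
    · norm_num
  · rw [Int.toNat_natCast, Nat.and_comm (2 ^ b), Nat.and_two_pow]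
    rcases (-v - 1).toNat.testBit b
    · norm_num
    · simp

theorem pv_mem_bits (g v x : Int) :
    x ∈ pvBits g v ↔ ∃ b : Nat, b < 32 ∧ x = g * 32 + b ∧ (pvW v).testBit b = true := by
  unfold pvBits
  simp only [List.mem_map, List.mem_filter, PySem.List.mem_pyRange_one, decide_eq_true_eq]
  constructor
  · rintro ⟨b, ⟨⟨hb0, hb32⟩, hp⟩, rfl⟩
    refine ⟨b.toNat, by omega, by rw [Int.toNat_of_nonneg hb0], ?_⟩
    refine (pv_band_pow v b.toNat (by omega)).mp ?_
    rwa [Int.toNat_of_nonneg hb0]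
  · rintro ⟨b, hb, rfl, ht⟩
    exact ⟨(b : Int), ⟨⟨by positivity, by exact_mod_cast hb⟩,
      (pv_band_pow v b hb).mpr ht⟩, rfl⟩

theorem pv_bits_pairwise (g v : Int) : (pvBits g v).Pairwise (· < ·) := by
  unfold pvBits
  refine List.pairwise_map.mpr (List.Pairwise.imp ?_
    (List.Pairwise.sublist List.filter_sublist (PySem.List.pairwise_lt_pyRange_one 0 32)))
  intro a b hab
  omega

theorem pv_bits_range (g v : Int) : ∀ x ∈ pvBits g v, g * 32 ≤ x ∧ x < (g + 1) * 32 := by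
  intro x hx
  rcases (pv_mem_bits g v x).mp hx with ⟨b, hb, rfl, -⟩
  omega

theorem pv_alist_bound (g : Int) (l : List String) : ∀ x ∈ pvAList g l, g * 32 ≤ x := by
  induction l generalizing g with
  | nil => simp [pvAList]
  | cons s t ih =>
    intro x hx
    rcases List.mem_append.mp hx with h | h
    · exact (pv_bits_range g (pvVal s) x h).1
    · have := ih (g + 1) x h; omega

theorem pv_alist_pairwise (g : Int) (l : List String) : (pvAList g l).Pairwise (· < ·) := by
  induction l generalizing g with
  | nil => exact List.Pairwise.nil
  | cons s t ih =>
    refine List.pairwise_append.mpr ⟨pv_bits_pairwise _ _, ih (g + 1), ?_⟩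
    intro x hx y hy
    have h1 := (pv_bits_range g (pvVal s) x hx).2
    have h2 := pv_alist_bound (g + 1) t y hy
    omega

theorem pv_inner (g v : Int) (acc : List Int) :
    (PySem.List.pyRange 0 32 1).foldl
      (fun cpus bit =>
        if PySem.Int.band v ((1 : Int) <<< bit) ≠ 0 then cpus ++ [g * 32 + bit] else cpus)
      acc = acc ++ pvBits g v := by
  unfold pvBits
  generalize PySem.List.pyRange 0 32 1 = l
  induction l generalizing acc with
  | nil => simp
  | cons b t ih =>
    rw [List.foldl_cons, List.filter_cons]
    by_cases h : PySem.Int.band v ((1 : Int) <<< b) ≠ 0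
    · rw [if_pos h, ih, if_pos (by simpa using h)]
      simp
    · rw [if_neg h, ih, if_neg (by simpa using h)]

theorem pv_foldA (l : List String)
    (hl : ∀ s ∈ l, (PySem.Int.ofStrBase? s 16).isSome = true) (g : Int) (acc : List Int) :
    (PySem.List.enumerate l g).foldl
      (fun cpus p =>
        match PySem.Int.ofStrBase? p.2 16 with
        | none => cpus
        | some segVal =>
          (PySem.List.pyRange 0 32 1).foldl
            (fun cpus bit =>
              if PySem.Int.band segVal ((1 : Int) <<< bit) ≠ 0 then
                cpus ++ [p.1 * 32 + bit]
              else cpus) cpus) acc = acc ++ pvAList g l := by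
  induction l generalizing g acc with
  | nil => simp [PySem.List.enumerate_nil, pvAList]
  | cons s t ih =>
    rw [PySem.List.enumerate_cons, List.foldl_cons]
    rcases Option.isSome_iff_exists.mp (hl s (by simp)) with ⟨v, hv⟩
    have hval : pvVal s = v := by simp [pvVal, hv]
    simp only [hv]
    rw [pv_inner g v acc, ih (fun s hs => hl s (by simp [hs])) (g + 1)]
    simp [pvAList, hval]

theorem pv_foldB (l : List String)
    (hl : ∀ s ∈ l, (PySem.Int.ofStrBase? s 16).isSome = true) (i t0 : Nat) :
    (PySem.List.enumerate l (i : Int)).foldl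
      (fun total p =>
        match PySem.Int.ofStrBase? p.2 16 with
        | none => total
        | some v => PySem.Int.bor total (PySem.Int.band v 0xFFFFFFFF <<< (p.1 * 32)))
      ((t0 : Nat) : Int) = ((t0 ||| pvT i l : Nat) : Int) := by
  induction l generalizing i t0 with
  | nil => simp [PySem.List.enumerate_nil, pvT]
  | cons s t ih =>
    rw [PySem.List.enumerate_cons, List.foldl_cons]
    rcases Option.isSome_iff_exists.mp (hl s (by simp)) with ⟨v, hv⟩
    have hval : pvVal s = v := by simp [pvVal, hv]
    simp only [hv]
    have hsh : PySem.Int.bor ((t0 : Nat) : Int) (PySem.Int.band v 0xFFFFFFFF <<< ((i : Int) * 32))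
        = (((t0 ||| (pvW v <<< (32 * i)) : Nat) : Nat) : Int) := by
      rw [pv_bandM_eq, show ((i : Int) * 32) = ((32 * i : Nat) : Int) by push_cast; ring,
        Int.shiftLeft_natCast, PySem.Int.bor_natCast]
    rw [hsh]
    have hcast : ((i : Int) + 1) = ((i + 1 : Nat) : Int) := by push_cast; ring
    rw [hcast, ih (fun s hs => hl s (by simp [hs])) (i + 1)]
    rw [pvT, hval, Nat.lor_assoc]

theorem pv_testBit_T (l : List String) (i n : Nat) :
    (pvT i l).testBit n = true ↔ (n : Int) ∈ pvAList (i : Int) l := by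
  induction l generalizing i with
  | nil => simp [pvT, pvAList]
  | cons s t ih =>
    have hW := pv_W_lt (pvVal s)
    rw [show pvT i (s :: t) = (pvW (pvVal s) <<< (32 * i)) ||| pvT (i + 1) t from rfl,
      show pvAList (i : Int) (s :: t) = pvBits (i : Int) (pvVal s) ++ pvAList ((i : Int) + 1) t
        from rfl, List.mem_append]
    rw [show ((i : Int) + 1) = ((i + 1 : Nat) : Int) by push_cast; ring, ← ih (i + 1)]
    simp only [Nat.testBit_lor, Nat.testBit_shiftLeft, Bool.or_eq_true, Bool.and_eq_true,
      decide_eq_true_eq, pv_mem_bits]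
    constructor
    · rintro (⟨hge, ht⟩ | h)
      · left
        have hlt : n - 32 * i < 32 := by
          by_contra hc
          have : pvW (pvVal s) < 2 ^ (n - 32 * i) :=
            lt_of_lt_of_le hW (Nat.pow_le_pow_right (by norm_num) (by omega))
          rw [Nat.testBit_lt_two_pow this] at ht
          exact Bool.false_ne_true ht
        exact ⟨n - 32 * i, hlt, by omega, ht⟩
      · right; exact h
    · rintro (⟨b, hb, heq, ht⟩ | h)
      · left
        have hn : n = 32 * i + b := by
          have : (n : Int) = (i : Int) * 32 + (b : Int) := heq
          omega
        refine ⟨by omega, ?_⟩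
        rwa [show n - 32 * i = b by omega]
      · right; exact h

theorem pv_sorted_mem_ext (l₁ : List Int) : ∀ (l₂ : List Int), l₁.Pairwise (· < ·) →
    l₂.Pairwise (· < ·) → (∀ x, x ∈ l₁ ↔ x ∈ l₂) → l₁ = l₂ := by
  induction l₁ with
  | nil =>
    intro l₂ _ _ h
    cases l₂ with
    | nil => rfl
    | cons b u => exact absurd ((h b).mpr (by simp)) (by simp)
  | cons a t ih =>
    intro l₂ h₁ h₂ h
    cases l₂ with
    | nil => exact absurd ((h a).mp (by simp)) (by simp)
    | cons b u =>
      have hab : a = b := by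
        rcases List.mem_cons.mp ((h a).mp (by simp)) with rfl | hau
        · rfl
        · rcases List.mem_cons.mp ((h b).mpr (by simp)) with rfl | hbt
          · rfl
          · have h1 : b < a := (List.pairwise_cons.mp h₂).1 a hau
            have h2 : a < b := (List.pairwise_cons.mp h₁).1 b hbt
            omega
      subst hab
      have htails : ∀ x, x ∈ t ↔ x ∈ u := by
        intro x
        constructor
        · intro hx
          have hax : a < x := (List.pairwise_cons.mp h₁).1 x hx
          rcases List.mem_cons.mp ((h x).mp (by simp [hx])) with rfl | hxu
          · omega
          · exact hxu
        · intro hx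
          have hax : a < x := (List.pairwise_cons.mp h₂).1 x hx
          rcases List.mem_cons.mp ((h x).mpr (by simp [hx])) with rfl | hxt
          · omega
          · exact hxt
      rw [ih u (List.pairwise_cons.mp h₁).2 (List.pairwise_cons.mp h₂).2 htails]

theorem pv_band_one (m k : Nat) :
    (PySem.Int.band (((m : Nat) : Int) >>> ((k : Nat) : Int)) 1 ≠ 0) ↔ m.testBit k = true := by
  rw [Int.shiftRight_natCast, show ((1 : Int)) = ((1 : Nat) : Int) from rfl,
    PySem.Int.band_natCast, Nat.and_one_is_mod, Nat.testBit_eq_decide_div_mod_eq,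
    Nat.shiftRight_eq_div_pow]
  constructor
  · intro h
    have : m / 2 ^ k % 2 = 1 := by omega
    simp [this]
  · intro h
    have : m / 2 ^ k % 2 = 1 := by simpa using h
    simp [this]

theorem pv_filter_eq (l : List String) :
    (PySem.List.pyRange 0 ((PySem.Int.bitLength ((pvT 0 l : Nat) : Int)) : Int) 1).filter
      (fun i => PySem.Int.band (((pvT 0 l : Nat) : Int) >>> i) 1 ≠ 0) = pvAList 0 l := by
  have hconv : ∀ k : Nat, (pvT 0 l).testBit k = true ↔ (k : Int) ∈ pvAList 0 l := by
    intro k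
    have := pv_testBit_T l 0 k
    rwa [Nat.cast_zero] at this
  have hnat : (((pvT 0 l : Nat) : Int)).natAbs = pvT 0 l := Int.natAbs_natCast _
  have hbl : ∀ k : Nat, (pvT 0 l).testBit k = true →
      k < PySem.Int.bitLength ((pvT 0 l : Nat) : Int) := by
    intro k hk
    have h1 := PySem.Int.lt_two_pow_bitLength ((pvT 0 l : Nat) : Int)
    rw [hnat] at h1
    by_contra hc
    have : pvT 0 l < 2 ^ k :=
      lt_of_lt_of_le h1 (Nat.pow_le_pow_right (by norm_num) (by omega))
    rw [Nat.testBit_lt_two_pow this] at hk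
    exact Bool.false_ne_true hk
  refine pv_sorted_mem_ext _ _ ?_ (pv_alist_pairwise 0 l) ?_
  · exact List.Pairwise.sublist List.filter_sublist (PySem.List.pairwise_lt_pyRange_one _ _)
  · intro x
    rw [List.mem_filter, PySem.List.mem_pyRange_one]
    constructor
    · rintro ⟨⟨hx0, _⟩, hp⟩
      have hx : x = ((x.toNat : Nat) : Int) := (Int.toNat_of_nonneg hx0).symm
      rw [hx] at hp ⊢
      rw [← hconv]
      exact (pv_band_one (pvT 0 l) x.toNat).mp (by simpa using hp)
    · intro hx
      have hx0 : 0 ≤ x := by have := pv_alist_bound 0 l x hx; omega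
      have hx' : x = ((x.toNat : Nat) : Int) := (Int.toNat_of_nonneg hx0).symm
      rw [hx'] at hx ⊢
      have ht : (pvT 0 l).testBit x.toNat = true := (hconv x.toNat).mpr hx
      refine ⟨⟨by positivity, by exact_mod_cast hbl x.toNat ht⟩, ?_⟩
      simpa using (pv_band_one (pvT 0 l) x.toNat).mpr ht

-- ===== VERDICT (by name: the statement is the Claim_ definition above) =====
theorem mask_to_cpus_spec : Claim_equal_mask_to_cpus := by
  intro mask _ hpre
  simp only [Spec_mask_to_cpus, mask_to_cpus, mask_to_cpus_alt]
  have hl : ∀ s ∈ ((PySem.Str.split? mask ",").getD []).reverse,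
      (PySem.Int.ofStrBase? s 16).isSome = true :=
    fun s hs => hpre s (List.mem_reverse.mp hs)
  rw [pv_foldA _ hl 0 [], List.nil_append,
    PySem.List.sorted_eq_of_perm_of_pairwise_lt _ _ _ (List.Perm.refl _)
      (pv_alist_pairwise 0 _)]
  have hB := pv_foldB _ hl 0 0
  rw [Nat.zero_or] at hB
  simp only [Nat.cast_zero] at hB
  rw [hB, pv_filter_eq]
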